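-- pv_equiv track=rewrite | github.com/FocusedConsistency/challenges-dailies | FCC_2026-02-27.py | shift_matrix
-- ===== SOURCE A (Python) =====
-- def shift_matrix(matrix, shift):
--     rows = len(matrix)
--     cols = len(matrix[0])
--     total = rows * cols
--     shift %= total
--
--     new_list = [0] * total
--     cols = len(matrix[0])
--     for i in range(len(matrix)):
--         for j in range(len(matrix[i])):
--             original_index = i * cols + j
--             index = (original_index + shift) % total
--             new_list[index] = matrix[i][j]
--
--     for i, row in enumerate(matrix):
--         for j, cell in enumerate(row):
--             matrix[i][j] = new_list[i * cols + j]
--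
--     return matrix
-- ===== SOURCE B (Python) =====
-- def shift_matrix(matrix, shift):
--     cols = len(matrix[0])
--     total = len(matrix) * cols
--     k = shift % total
--     flat = [x for row in matrix for x in row]
--     rotated = flat[total - k:] + flat[:total - k]
--     for i in range(len(matrix)):
--         matrix[i][:] = rotated[i * cols:(i + 1) * cols]
--     return matrix
-- ===== Notes on version B (the rewrite author's own statement) =====
-- stated objective: simpler
-- what changed: B replaces A's per-element modular scatter into a preallocated buffer (computing (i*cols+j+shift)%total for every cell) by flattening the matrix row-major, rotating it with one slice-and-concatenate (bulk C-level copies instead of per-cell Python index arithmetic), and writing the chunks back row by row; Pre_ excludes empty/zero-column matrices (A raises) and ragged matrices, where A's fixed-cols indexing either raises or mixes leftover zeros into the result.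
-- outside the precondition, e.g. on shift_matrix([[1, 2], [3]], 1): A returns [[0, 1], [2]], B returns [[1, 2], [3]]; on shift_matrix([[1, 2, 3], [4]], 2): A returns [[0, 0, 1], [2]], B returns [[1, 2, 3], [4]]
import Mathlib
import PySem

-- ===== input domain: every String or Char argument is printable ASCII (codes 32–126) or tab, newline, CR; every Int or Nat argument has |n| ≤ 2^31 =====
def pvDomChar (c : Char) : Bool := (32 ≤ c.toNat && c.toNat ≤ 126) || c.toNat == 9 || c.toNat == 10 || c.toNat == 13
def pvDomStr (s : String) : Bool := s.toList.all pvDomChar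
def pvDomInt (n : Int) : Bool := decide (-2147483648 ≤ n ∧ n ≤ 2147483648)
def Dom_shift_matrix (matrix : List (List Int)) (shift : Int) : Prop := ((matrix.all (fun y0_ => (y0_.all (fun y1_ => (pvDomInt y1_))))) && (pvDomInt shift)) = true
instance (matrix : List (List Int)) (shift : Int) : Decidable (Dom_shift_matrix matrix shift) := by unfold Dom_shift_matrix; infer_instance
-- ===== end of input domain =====

-- B rotates the row-major flattening with one slice-and-concatenate instead of A's per-cell
-- modular scatter; equivalence is about the RETURN value (both Pythons also mutate `matrix` in place).


-- ===== PORT A =====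
def shift_matrix (matrix : List (List Int)) (shift : Int) : List (List Int) :=
  let rows := matrix.length
  let cols := (matrix.headD []).length
  let total : Int := (rows : Int) * (cols : Int)
  let shift := PySem.Int.mod shift total
  let newList : List Int := List.replicate (rows * cols) 0
  let newList := (List.range matrix.length).foldl (fun nl (i : Nat) =>
      (List.range (matrix.getD i []).length).foldl (fun nl (j : Nat) =>
        let original_index : Int := (i : Int) * (cols : Int) + (j : Int)
        let index := PySem.Int.mod (original_index + shift) total
        nl.set index.toNat ((matrix.getD i []).getD j 0)) nl) newList
  (PySem.List.enumerate matrix).map (fun p =>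
    (PySem.List.enumerate p.2).map (fun q =>
      newList.getD (p.1 * (cols : Int) + q.1).toNat 0))

-- ===== PORT B =====
def shift_matrix_alt (matrix : List (List Int)) (shift : Int) : List (List Int) :=
  let cols := (matrix.headD []).length
  let total : Int := (matrix.length : Int) * (cols : Int)
  let k := PySem.Int.mod shift total
  let flat := matrix.flatMap (fun row => row)
  let rotated := PySem.List.slice flat (some (total - k)) none ++ PySem.List.slice flat none (some (total - k))
  (List.range matrix.length).foldl (fun m i =>
      m.set i (PySem.List.slice rotated (some ((i : Int) * (cols : Int))) (some (((i : Int) + 1) * (cols : Int))))) matrix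

-- ===== PRECONDITION & SPEC =====
-- Pre_ excludes matrices that are empty or have an empty first row (A raises IndexError /
-- ZeroDivisionError) and ragged matrices, on which A's fixed-cols indexing either raises or
-- mixes leftover zeros of its scratch buffer into the result — accidental values no caller
-- would specify.
def Pre_shift_matrix (matrix : List (List Int)) (shift : Int) : Prop :=
  matrix ≠ [] ∧ 0 < (matrix.headD []).length ∧
    ∀ row ∈ matrix, row.length = (matrix.headD []).length
instance (matrix : List (List Int)) (shift : Int) : Decidable (Pre_shift_matrix matrix shift) := by
  unfold Pre_shift_matrix; infer_instance
def pvWitness_shift_matrix : List (List Int) × Int := ([[1, 2], [3, 4]], 3)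
def Spec_shift_matrix (matrix : List (List Int)) (shift : Int) (out : List (List Int)) : Prop := out = shift_matrix_alt matrix shift
instance (matrix : List (List Int)) (shift : Int) (out : List (List Int)) : Decidable (Spec_shift_matrix matrix shift out) := by unfold Spec_shift_matrix; infer_instance

-- ===== CLAIM (what is proved, stated in full; the proofs are below) =====
def Claim_equal_shift_matrix : Prop := ∀ (matrix : List (List Int)) (shift : Int), Dom_shift_matrix matrix shift → Pre_shift_matrix matrix shift → Spec_shift_matrix matrix shift (shift_matrix matrix shift)

-- ===== LEMMAS AND PROOFS =====

theorem pv_foldl_congr {α β : Type} (f g : α → β → α) :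
    ∀ (l : List β) (init : α), (∀ a b, b ∈ l → f a b = g a b) →
      l.foldl f init = l.foldl g init := by
  intro l
  induction l with
  | nil => intro init _; rfl
  | cons x xs ih =>
      intro init h
      simp only [List.foldl_cons]
      rw [h init x (List.mem_cons_self ..)]
      exact ih _ (fun a b hb => h a b (List.mem_cons_of_mem _ hb))

theorem pv_nested_range_foldl {α : Type} (c : Nat) (f : α → Nat → α) :
    ∀ (r : Nat) (init : α),
      (List.range r).foldl (fun s i => (List.range c).foldl (fun s j => f s (i * c + j)) s) init
        = (List.range (r * c)).foldl f init := by
  intro r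
  induction r with
  | zero => intro init; simp
  | succ r ih =>
      intro init
      rw [List.range_succ, List.foldl_append, ih]
      have h : (r + 1) * c = r * c + c := by ring
      rw [h, List.range_add, List.foldl_append, List.foldl_map]
      simp

theorem pv_flat_len (c : Nat) :
    ∀ (m : List (List Int)), (∀ row ∈ m, row.length = c) →
      (m.flatMap (fun row => row)).length = m.length * c := by
  intro m
  induction m with
  | nil => simp
  | cons row rest ih =>
      intro h
      simp only [List.flatMap_cons, List.length_append, List.length_cons]
      rw [ih (fun x hx => h x (List.mem_cons_of_mem _ hx)), h row (List.mem_cons_self ..)]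
      ring

theorem pv_flat_getD (c : Nat) :
    ∀ (m : List (List Int)), (∀ row ∈ m, row.length = c) →
      ∀ i j, i < m.length → j < c →
        (m.flatMap (fun row => row)).getD (i * c + j) 0 = (m.getD i []).getD j 0 := by
  intro m
  induction m with
  | nil => intro _ i j hi _; simp at hi
  | cons row rest ih =>
      intro h i j hi hj
      have hrow : row.length = c := h row (List.mem_cons_self ..)
      cases i with
      | zero =>
          simp only [List.flatMap_cons, Nat.zero_mul, Nat.zero_add, List.getD_cons_zero]
          rw [List.getD_append _ _ _ _ (by omega)]
      | succ i =>
          simp only [List.flatMap_cons, List.getD_cons_succ]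
          rw [List.getD_append_right _ _ _ _ (by rw [hrow]; nlinarith)]
          have he : (i + 1) * c + j - row.length = i * c + j := by rw [hrow]; ring_nf; omega
          rw [he]
          exact ih (fun x hx => h x (List.mem_cons_of_mem _ hx)) i j (by simpa using hi) hj

def pvScat (flat : List Int) (k tot n : Nat) : List Int :=
  (List.range n).foldl (fun nl p => nl.set ((p + k) % tot) (flat.getD p 0)) (List.replicate tot 0)

theorem pvScat_succ (flat : List Int) (k tot n : Nat) :
    pvScat flat k tot (n + 1) = (pvScat flat k tot n).set ((n + k) % tot) (flat.getD n 0) := by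
  simp [pvScat, List.range_succ]

theorem pvScat_length (flat : List Int) (k tot : Nat) :
    ∀ n, (pvScat flat k tot n).length = tot := by
  intro n
  induction n with
  | zero => simp [pvScat]
  | succ n ih => rw [pvScat_succ, List.length_set, ih]

theorem pvScat_getD (flat : List Int) (k tot : Nat) (hk : k < tot) :
    ∀ n, n ≤ tot → ∀ q, q < tot →
      (pvScat flat k tot n).getD q 0 =
        if (q + (tot - k)) % tot < n then flat.getD ((q + (tot - k)) % tot) 0 else 0 := by
  intro n
  induction n with
  | zero =>
      intro _ q hq
      simp [pvScat]
  | succ n ih =>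
      intro hn q hq
      rw [pvScat_succ]
      rw [List.getD_eq_getElem _ _ (by rw [List.length_set, pvScat_length]; exact hq)]
      rw [List.getElem_set]
      by_cases hcase : (n + k) % tot = q
      · have he : (q + (tot - k)) % tot = n := by
          rw [← hcase, Nat.mod_add_mod]
          have h2 : n + k + (tot - k) = n + tot := by omega
          rw [h2, Nat.add_mod_right]
          exact Nat.mod_eq_of_lt (by omega)
        rw [if_pos hcase, he, if_pos (by omega)]
      · rw [if_neg hcase]
        rw [← List.getD_eq_getElem _ 0, ih (by omega) q hq]
        have hne : (q + (tot - k)) % tot ≠ n := by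
          intro e
          apply hcase
          have : (n + k) % tot = (q + (tot - k) + k) % tot := by
            conv_lhs => rw [← e]
            rw [Nat.mod_add_mod]
          rw [this]
          have h3 : q + (tot - k) + k = q + tot := by omega
          rw [h3, Nat.add_mod_right]
          exact Nat.mod_eq_of_lt hq
        by_cases hlt : (q + (tot - k)) % tot < n
        · rw [if_pos hlt, if_pos (by omega)]
        · rw [if_neg hlt, if_neg (by omega)]

theorem pv_rot_getD (flat : List Int) (k tot : Nat) (hk : k < tot)
    (hlen : flat.length = tot) (q : Nat) (hq : q < tot) :
    (flat.drop (tot - k) ++ flat.take (tot - k)).getD q 0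
      = flat.getD ((q + (tot - k)) % tot) 0 := by
  have hd : (flat.drop (tot - k)).length = k := by rw [List.length_drop, hlen]; omega
  by_cases hqk : q < k
  · rw [List.getD_append _ _ _ _ (by omega)]
    have h1 : (q + (tot - k)) % tot = q + (tot - k) := Nat.mod_eq_of_lt (by omega)
    rw [h1]
    rw [List.getD_eq_getElem _ _ (by omega), List.getElem_drop,
        List.getD_eq_getElem _ _ (by omega)]
    congr 1
    omega
  · rw [List.getD_append_right _ _ _ _ (by omega)]
    have h1 : (q + (tot - k)) % tot = q - k := by
      rw [Nat.mod_eq_sub_mod (by omega)]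
      have h2 : q + (tot - k) - tot = q - k := by omega
      rw [h2]
      exact Nat.mod_eq_of_lt (by omega)
    rw [h1, hd]
    have hqk' : q - k < tot - k := by omega
    rw [List.getD_eq_getElem _ _ (by rw [List.length_take]; omega),
        List.getElem_take, List.getD_eq_getElem _ _ (by omega)]

theorem pv_set_foldl {α : Type} (g : Nat → α) :
    ∀ (n : Nat) (m : List α), n ≤ m.length →
      (List.range n).foldl (fun acc i => acc.set i (g i)) m
        = (List.range n).map g ++ m.drop n := by
  intro n
  induction n with
  | zero => intro m _; simp
  | succ n ih =>
      intro m hn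
      rw [List.range_succ, List.foldl_append, ih m (by omega)]
      simp only [List.foldl_cons, List.foldl_nil]
      rw [List.set_append]
      have hlen : ((List.range n).map g).length = n := by simp
      rw [if_neg (by omega), hlen, Nat.sub_self]
      rw [List.drop_eq_getElem_cons (by omega), List.set_cons_zero]
      simp

theorem pv_enum_map_fst {α β : Type} (f : Int → β) :
    ∀ (xs : List α) (s : Int),
      (PySem.List.enumerate xs s).map (fun q => f q.1)
        = (List.range xs.length).map (fun (j : Nat) => f (s + (j : Int))) := by
  intro xs
  induction xs with
  | nil => intro s; simp [PySem.List.enumerate]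
  | cons x t ih =>
      intro s
      rw [PySem.List.enumerate_cons, List.map_cons, ih (s + 1),
          List.length_cons, List.range_succ_eq_map, List.map_cons, List.map_map]
      congr 1
      · norm_num
      · apply List.map_congr_left
        intro j _
        simp only [Function.comp]
        congr 1
        push_cast
        ring

theorem shift_matrix_main (matrix : List (List Int)) (shift : Int)
    (hpre : Pre_shift_matrix matrix shift) :
    shift_matrix matrix shift = shift_matrix_alt matrix shift := by
  obtain ⟨hne, hc0, hrect⟩ := hpre
  simp only [shift_matrix, shift_matrix_alt]
  set r := matrix.length with hrdef
  set c := (matrix.headD []).length with hcdef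
  have hr0 : 0 < r := List.length_pos_of_ne_nil hne
  have htot0 : 0 < r * c := Nat.mul_pos hr0 hc0
  have htotI : ((r : Int) * (c : Int)) = ((r * c : Nat) : Int) := by push_cast; ring
  have htotpos : (0 : Int) < (r : Int) * (c : Int) := by rw [htotI]; exact_mod_cast htot0
  set kI := PySem.Int.mod shift ((r : Int) * (c : Int)) with hkIdef
  have hkemod : kI = shift % ((r : Int) * (c : Int)) :=
    PySem.Int.mod_eq_emod_of_pos htotpos
  have hk0 : 0 ≤ kI := by rw [hkemod]; exact Int.emod_nonneg _ (ne_of_gt htotpos)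
  have hkIlt : kI < (r : Int) * (c : Int) := by
    rw [hkemod]; exact Int.emod_lt_of_pos _ htotpos
  set k := kI.toNat with hkdef
  have hkIcast : kI = (k : Int) := (Int.toNat_of_nonneg hk0).symm
  have hklt : k < r * c := by
    have := hkIlt; rw [hkIcast, htotI] at this; exact_mod_cast this
  set flat := matrix.flatMap (fun row => row) with hflatdef
  have hflatlen : flat.length = r * c := pv_flat_len c matrix hrect
  have hrotlen : (flat.drop (r * c - k) ++ flat.take (r * c - k)).length = r * c := by
    simp only [List.length_append, List.length_drop, List.length_take, hflatlen]
    omega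
  have hrowlen : ∀ i, i < r → (matrix.getD i []).length = c := by
    intro i hi
    rw [List.getD_eq_getElem _ _ hi]
    exact hrect _ (List.getElem_mem hi)
  -- A's scratch buffer equals the rotated flat list
  have hscat_rot : pvScat flat k (r * c) (r * c)
      = flat.drop (r * c - k) ++ flat.take (r * c - k) := by
    apply List.ext_getElem
    · rw [pvScat_length, hrotlen]
    · intro q h1 h2
      have hq : q < r * c := by rw [pvScat_length] at h1; exact h1
      have e1 := List.getD_eq_getElem (pvScat flat k (r * c) (r * c)) 0 h1
      have e2 := List.getD_eq_getElem (flat.drop (r * c - k) ++ flat.take (r * c - k)) 0 h2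
      rw [← e1, ← e2, pvScat_getD flat k (r * c) hklt (r * c) le_rfl q hq,
          pv_rot_getD flat k (r * c) hklt hflatlen q hq,
          if_pos (Nat.mod_lt _ htot0)]
  have hbuf : (List.range r).foldl (fun nl (i : Nat) =>
        (List.range (matrix.getD i []).length).foldl (fun nl (j : Nat) =>
          nl.set (PySem.Int.mod ((i : Int) * (c : Int) + (j : Int) + kI) ((r : Int) * (c : Int))).toNat
            ((matrix.getD i []).getD j 0)) nl) (List.replicate (r * c) 0)
      = flat.drop (r * c - k) ++ flat.take (r * c - k) := by
    have step1 := pv_foldl_congr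
      (fun nl (i : Nat) =>
        (List.range (matrix.getD i []).length).foldl (fun nl (j : Nat) =>
          nl.set (PySem.Int.mod ((i : Int) * (c : Int) + (j : Int) + kI) ((r : Int) * (c : Int))).toNat
            ((matrix.getD i []).getD j 0)) nl)
      (fun s (i : Nat) =>
        (List.range c).foldl (fun s (j : Nat) =>
          (fun (nl : List Int) (p : Nat) => nl.set ((p + k) % (r * c)) (flat.getD p 0)) s (i * c + j)) s)
      (List.range r) (List.replicate (r * c) 0) ?_
    · rw [step1]
      exact (pv_nested_range_foldl c
        (fun (nl : List Int) (p : Nat) => nl.set ((p + k) % (r * c)) (flat.getD p 0)) r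
        (List.replicate (r * c) 0)).trans hscat_rot
    · intro nl i hi
      have hir : i < r := List.mem_range.mp hi
      beta_reduce
      rw [hrowlen i hir]
      apply pv_foldl_congr
      intro nl' j hj
      have hjc : j < c := List.mem_range.mp hj
      congr 1
      · rw [hkIcast, htotI]
        have hcast : ((i : Int) * (c : Int) + (j : Int) + (k : Int))
            = ((i * c + j + k : Nat) : Int) := by push_cast; ring
        rw [hcast, PySem.Int.mod_natCast, Int.toNat_natCast]
      · exact (pv_flat_getD c matrix hrect i j hir hjc).symm
  rw [hbuf]
  -- B's slices are the same rotated list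
  have hsub : (r : Int) * (c : Int) - kI = ((r * c - k : Nat) : Int) := by
    rw [hkIcast, htotI]; omega
  rw [hsub, PySem.List.slice_from_natCast, PySem.List.slice_to_natCast]
  -- B's write-back loop replaces every row
  have hwb := pv_set_foldl
    (fun (i : Nat) => PySem.List.slice (flat.drop (r * c - k) ++ flat.take (r * c - k))
      (some ((i : Int) * (c : Int))) (some (((i : Int) + 1) * (c : Int))))
    r matrix (le_of_eq hrdef.symm)
  rw [hwb, hrdef, List.drop_length, List.append_nil, ← hrdef]
  -- pointwise comparison of the two outputs
  apply List.ext_getElem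
  · simp [PySem.List.length_enumerate]
    omega
  · intro i h1 h2
    have hir : i < r := by simpa using h2
    have hic : i * c + c ≤ r * c := by
      have h5 : i * c + c = (i + 1) * c := by ring
      have h6 : (i + 1) * c ≤ r * c := Nat.mul_le_mul_right c hir
      omega
    rw [List.getElem_map, List.getElem_map, PySem.List.getElem_enumerate]
    rw [List.getElem_range]
    have hrowi : i < matrix.length := by omega
    rw [pv_enum_map_fst
      (fun x => (flat.drop (r * c - k) ++ flat.take (r * c - k)).getD
        (((0 : Int) + (i : Nat)) * (c : Int) + x).toNat 0) (matrix[i]) 0]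
    have hlen_i : (matrix[i]).length = c := hrect _ (List.getElem_mem hrowi)
    have hlo : ((i : Nat) : Int) * (c : Int) = ((i * c : Nat) : Int) := by push_cast; ring
    have hhi : (((i : Nat) : Int) + 1) * (c : Int) = (((i + 1) * c : Nat) : Int) := by
      push_cast; ring
    rw [hlo, hhi, PySem.List.slice_natCast]
    have hsub2 : (i + 1) * c - i * c = c := by
      have h5 : (i + 1) * c = i * c + c := by ring
      omega
    rw [hsub2]
    apply List.ext_getElem
    · simp [hlen_i, hrotlen]
      omega
    · intro j hj1 hj2
      have hjc : j < c := by simpa [hlen_i] using hj1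
      rw [List.getElem_map, List.getElem_range, List.getElem_take, List.getElem_drop]
      have hidx : i * c + j < r * c := by omega
      have hcast2 : (((0 : Int) + (i : Nat)) * (c : Int) + ((0 : Int) + (j : Nat))).toNat
          = i * c + j := by
        have : ((0 : Int) + (i : Nat)) * (c : Int) + ((0 : Int) + (j : Nat))
            = ((i * c + j : Nat) : Int) := by push_cast; ring
        rw [this, Int.toNat_natCast]
      rw [hcast2]
      exact List.getD_eq_getElem _ _ (by omega)

-- ===== VERDICT (by name: the statement is the Claim_ definition above) =====
theorem shift_matrix_spec : Claim_equal_shift_matrix := by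
  intro matrix shift _ hpre
  unfold Spec_shift_matrix
  exact shift_matrix_main matrix shift hpre
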